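-- pv_equiv track=rewrite | github.com/TomohiroKida/aoc | python/y2025/day04.py | part2
-- ===== SOURCE A (Python) =====
-- import copy
--
-- def parse(input_data: str):
--     data = [list(line) for line in input_data.strip().split("\n")]
--     return data
--
-- def remove_roll(state: list[list[str]]) -> list[list[str]]:
--     height, width = len(state), len(state[0])
--     area = [(-1, -1), (-1, 0), (-1, 1), (0, -1), (0, 1), (1, -1), (1, 0), (1, 1)]
--
--     for row in range(height):
--         for col in range(width):
--             if state[row][col] != "@":
--                 continue
--
--             cnt = 0
--             for i, j in area:
--                 n_row = row + i
--                 n_col = col + j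
--                 if 0 <= n_row < height and 0 <= n_col < width:
--                     if state[n_row][n_col] == "@":
--                         cnt += 1
--
--             if cnt < 4:
--                 state[row][col] = "x"
--
--     return state
--
-- def part2(input_data: str):
--     state = parse(input_data)
--     before_state: list[list[str]] = []
--     removed = 0
--     while before_state != state:
--         # print_state(state)
--         before_state = copy.deepcopy(state)
--         state = remove_roll(state)
--         removed += sum(h.count("x") for h in state)
--         state = [["." if c == "x" else c for c in row] for row in state]
--
--     return removed
-- ===== SOURCE B (Python) =====
-- def part2(input_data: str):
--     # Fixpoint of synchronous pruning: a roll survives iff it keeps >= 4 living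
--     # neighbors; the final survivor set is the unique maximal such set, so the
--     # number removed equals total rolls minus the survivors.
--     lines = input_data.strip().split("\n")
--     alive = {(r, c) for r, line in enumerate(lines)
--              for c, ch in enumerate(line) if ch == "@"}
--     total = len(alive)
--     offs = [(-1, -1), (-1, 0), (-1, 1), (0, -1), (0, 1), (1, -1), (1, 0), (1, 1)]
--     while True:
--         keep = {p for p in alive
--                 if sum((p[0] + dr, p[1] + dc) in alive for dr, dc in offs) >= 4}
--         if len(keep) == len(alive):
--             return total - len(alive)
--         alive = keep
-- ===== Notes on version B (the rewrite author's own statement) =====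
-- stated objective: alternative
-- what changed: A repeatedly rescans the whole character grid in place, marking removed rolls 'x', counting the marks and rewriting them to '.'; B instead builds the set of live coordinates once and synchronously prunes it to a fixpoint (keep exactly the cells with >= 4 live neighbours), returning total minus survivors — equal because every greedy removal order ends at the same maximal stable set.
-- outside the precondition, e.g. on part2('@\n@@'): A returns 2, B returns 3; on part2('x'): A returns 1, B returns 0; on part2('x@@\n@@@'): A returns 6, B returns 5
import Mathlib
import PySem

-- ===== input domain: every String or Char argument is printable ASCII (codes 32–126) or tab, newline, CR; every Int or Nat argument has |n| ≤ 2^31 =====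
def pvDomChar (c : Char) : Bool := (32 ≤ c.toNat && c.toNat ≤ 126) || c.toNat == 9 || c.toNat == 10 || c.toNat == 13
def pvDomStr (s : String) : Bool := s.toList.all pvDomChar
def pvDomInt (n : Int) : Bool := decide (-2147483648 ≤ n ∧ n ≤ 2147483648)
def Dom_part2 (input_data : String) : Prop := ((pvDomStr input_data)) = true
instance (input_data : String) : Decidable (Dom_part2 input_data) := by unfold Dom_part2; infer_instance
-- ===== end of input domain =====

-- B replaces A's repeated in-place marking passes by a synchronous prune-to-fixpoint on the
-- set of live coordinates (objective: alternative algorithm, same asymptotic cost).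
-- A mutates only its own freshly parsed list; no caller-visible side effects are involved.

-- ===== PORT A =====

-- lines are modelled as List Char (Python list("...") of 1-char strings ≅ chars)
def pvLines (s : String) : List (List Char) :=
  PySem.Chars.splitOn (PySem.Chars.strip s.toList) ['\n']

-- parse: [list(line) for line in input_data.strip().split("\n")]
def pvParse (s : String) : List (List Char) := pvLines s

def pvArea : List (Int × Int) :=
  [(-1,-1),(-1,0),(-1,1),(0,-1),(0,1),(1,-1),(1,0),(1,1)]

-- state[r][c] (indices produced by range(), hence the total getD form)
def pvGget (g : List (List Char)) (r c : Int) : Char :=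
  PySem.List.pyGetD (PySem.List.pyGetD g r []) c ' '

-- the cnt loop over the 8 offsets, with the bounds guard
def pvCnt (g : List (List Char)) (h w r c : Int) : Int :=
  pvArea.foldl (fun acc d =>
    if 0 ≤ r + d.1 ∧ r + d.1 < h ∧ 0 ≤ c + d.2 ∧ c + d.2 < w then
      if pvGget g (r + d.1) (c + d.2) = '@' then acc + 1 else acc
    else acc) 0

-- state[row][col] = "x"
def pvSetX (g : List (List Char)) (r c : Int) : List (List Char) :=
  g.set r.toNat ((PySem.List.pyGetD g r []).set c.toNat 'x')

-- one body of the row/col loop of remove_roll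
def pvStep (h w : Int) (g : List (List Char)) (r c : Int) : List (List Char) :=
  if pvGget g r c = '@' then
    (if pvCnt g h w r c < 4 then pvSetX g r c else g)
  else g

def pvRemoveRoll (g : List (List Char)) : List (List Char) :=
  let h : Int := g.length
  let w : Int := (PySem.List.pyGetD g 0 []).length
  (PySem.List.pyRange 0 h 1).foldl (fun g1 r =>
    (PySem.List.pyRange 0 w 1).foldl (fun g2 c => pvStep h w g2 r c) g1) g

-- sum(h.count("x") for h in state)
def pvXcount (g : List (List Char)) : Int :=
  (g.map (fun row => (row.count 'x' : Int))).sum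

-- [["." if c == "x" else c for c in row] for row in state]
def pvClean (g : List (List Char)) : List (List Char) :=
  g.map (fun row => row.map (fun ch => if ch = 'x' then '.' else ch))

-- termination infrastructure for the while loop: cells only ever move '@'→'x'→'.',
-- so the number of '@'/'x' cells strictly decreases whenever the grid changed.
def pvRowRel (r1 r2 : List Char) : Prop :=
  List.Forall₂ (fun a b => b = a ∨ (a = '@' ∧ b = 'x')) r1 r2

def pvGridRel (g1 g2 : List (List Char)) : Prop := List.Forall₂ pvRowRel g1 g2

def pvMu (g : List (List Char)) : Nat :=
  (g.map (List.countP (fun ch => ch == '@' || ch == 'x'))).sum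

theorem pvRowRel_refl (r : List Char) : pvRowRel r r :=
  List.forall₂_same.mpr (fun _ _ => Or.inl rfl)

theorem pvGridRel_refl (g : List (List Char)) : pvGridRel g g :=
  List.forall₂_same.mpr (fun r _ => pvRowRel_refl r)

theorem pvRowRel_trans {r1 r2 r3 : List Char} (h1 : pvRowRel r1 r2) (h2 : pvRowRel r2 r3) :
    pvRowRel r1 r3 := by
  induction h1 generalizing r3 with
  | nil => cases h2; exact List.Forall₂.nil
  | @cons a b l1 l2 hab _ ih =>
    cases h2 with
    | cons hbc h2t =>
      refine List.Forall₂.cons ?_ (ih h2t)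
      rcases hab with h | ⟨ha, hb⟩ <;> rcases hbc with h' | ⟨hb', hc'⟩ <;> subst_vars <;> simp_all

theorem pvGridRel_trans {g1 g2 g3 : List (List Char)} (h1 : pvGridRel g1 g2)
    (h2 : pvGridRel g2 g3) : pvGridRel g1 g3 := by
  induction h1 generalizing g3 with
  | nil => cases h2; exact List.Forall₂.nil
  | cons hab _ ih =>
    cases h2 with
    | cons hbc h2t => exact List.Forall₂.cons (pvRowRel_trans hab hbc) (ih h2t)

theorem pvRowRel_set (row : List Char) : ∀ (n : Nat), row.getD n ' ' = '@' →
    pvRowRel row (row.set n 'x') := by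
  induction row with
  | nil => intro n h; simp at h
  | cons a t ih =>
    intro n h
    cases n with
    | zero =>
      simp only [List.getD_cons_zero] at h
      exact List.Forall₂.cons (Or.inr ⟨h, rfl⟩) (pvRowRel_refl t)
    | succ m =>
      simp only [List.getD_cons_succ] at h
      exact List.Forall₂.cons (Or.inl rfl) (ih m h)

theorem pvGridRel_set (g : List (List Char)) : ∀ (m : Nat) (row' : List Char),
    pvRowRel (g.getD m []) row' → pvGridRel g (g.set m row') := by
  induction g with
  | nil => intro m row' _; exact pvGridRel_refl []
  | cons a t ih =>
    intro m row' h
    cases m with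
    | zero =>
      simp only [List.getD_cons_zero] at h
      exact List.Forall₂.cons h (pvGridRel_refl t)
    | succ m =>
      simp only [List.getD_cons_succ] at h
      exact List.Forall₂.cons (pvRowRel_refl a) (ih m row' h)

theorem pvGridRel_step (h w : Int) (g : List (List Char)) (r c : Int)
    (hr : 0 ≤ r) (hc : 0 ≤ c) : pvGridRel g (pvStep h w g r c) := by
  unfold pvStep
  split_ifs with h1 h2
  · unfold pvSetX
    rw [PySem.List.pyGetD_of_nonneg _ _ hr]
    apply pvGridRel_set
    apply pvRowRel_set
    unfold pvGget at h1
    rw [PySem.List.pyGetD_of_nonneg _ _ hr, PySem.List.pyGetD_of_nonneg _ _ hc] at h1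
    exact h1
  · exact pvGridRel_refl g
  · exact pvGridRel_refl g

-- all (row, col) pairs visited by remove_roll, in scan order
def pvPs (h w : Int) : List (Int × Int) :=
  (PySem.List.pyRange 0 h 1).flatMap (fun r => (PySem.List.pyRange 0 w 1).map (fun c => (r, c)))

theorem pvMem_pvPs {h w : Int} {p : Int × Int} :
    p ∈ pvPs h w ↔ 0 ≤ p.1 ∧ p.1 < h ∧ 0 ≤ p.2 ∧ p.2 < w := by
  cases p with
  | mk a b =>
    simp only [pvPs, List.mem_flatMap, List.mem_map, PySem.List.mem_pyRange_one]
    constructor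
    · rintro ⟨r, ⟨hr1, hr2⟩, c, ⟨hc1, hc2⟩, heq⟩
      rw [Prod.mk.injEq] at heq
      obtain ⟨rfl, rfl⟩ := heq
      exact ⟨hr1, hr2, hc1, hc2⟩
    · rintro ⟨h1, h2, h3, h4⟩
      exact ⟨a, ⟨h1, h2⟩, b, ⟨h3, h4⟩, rfl⟩

theorem pvRemoveRoll_eq (g : List (List Char)) :
    pvRemoveRoll g = (pvPs (g.length : Int) ((PySem.List.pyGetD g 0 []).length : Int)).foldl
      (fun g2 p => pvStep (g.length : Int) ((PySem.List.pyGetD g 0 []).length : Int) g2 p.1 p.2) g := by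
  simp [pvRemoveRoll, pvPs, List.foldl_flatMap, List.foldl_map]

theorem pvGridRel_fold (h w : Int) (ps : List (Int × Int)) :
    ∀ g, (∀ p ∈ ps, 0 ≤ p.1 ∧ 0 ≤ p.2) →
    pvGridRel g (ps.foldl (fun g2 p => pvStep h w g2 p.1 p.2) g) := by
  induction ps with
  | nil => intro g _; exact pvGridRel_refl g
  | cons q t ih =>
    intro g hm
    simp only [List.foldl_cons]
    exact pvGridRel_trans
      (pvGridRel_step h w g q.1 q.2 (hm q (by simp)).1 (hm q (by simp)).2)
      (ih _ (fun p hp => hm p (by simp [hp])))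

theorem pvGridRel_removeRoll (g : List (List Char)) : pvGridRel g (pvRemoveRoll g) := by
  rw [pvRemoveRoll_eq]
  apply pvGridRel_fold
  intro p hp
  rcases pvMem_pvPs.mp hp with ⟨h1, _, h3, _⟩
  exact ⟨h1, h3⟩

theorem pvRow_mu {r1 r2 : List Char} (h : pvRowRel r1 r2) :
    (r2.map (fun ch => if ch = 'x' then '.' else ch)).countP (fun ch => ch == '@' || ch == 'x') ≤
      r1.countP (fun ch => ch == '@' || ch == 'x') ∧
    (r2.map (fun ch => if ch = 'x' then '.' else ch) ≠ r1 →
      (r2.map (fun ch => if ch = 'x' then '.' else ch)).countP (fun ch => ch == '@' || ch == 'x') <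
        r1.countP (fun ch => ch == '@' || ch == 'x')) := by
  induction h with
  | nil => simp
  | @cons a b l1 l2 hab _ ih =>
    simp only [List.map_cons, List.countP_cons, ne_eq, List.cons.injEq, not_and_or]
    have hcell : ((if b = 'x' then '.' else b) = a ∧
        ((if (if b = 'x' then '.' else b) == '@' || (if b = 'x' then '.' else b) == 'x' then 1 else 0) : Nat) =
          (if a == '@' || a == 'x' then 1 else 0)) ∨
        ((if b = 'x' then '.' else b) ≠ a ∧
        ((if (if b = 'x' then '.' else b) == '@' || (if b = 'x' then '.' else b) == 'x' then 1 else 0) : Nat) <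
          (if a == '@' || a == 'x' then 1 else 0)) := by
      rcases hab with hba | ⟨ha, hb⟩
      · subst hba
        by_cases hx : b = 'x'
        · subst hx; right; simp
        · left; simp [hx]
      · subst ha; subst hb; right; simp
    rcases hcell with ⟨he, hc⟩ | ⟨hne, hc⟩
    · constructor
      · omega
      · rintro (h | h)
        · exact absurd he h
        · have := ih.2 h; omega
    · have := ih.1
      constructor
      · omega
      · intro _; omega

theorem pvMu_clean_le {g1 g2 : List (List Char)} (h : pvGridRel g1 g2) :
    pvMu (pvClean g2) ≤ pvMu g1 ∧ (pvClean g2 ≠ g1 → pvMu (pvClean g2) < pvMu g1) := by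
  induction h with
  | nil => simp [pvClean, pvMu]
  | @cons a b l1 l2 hab htail ih =>
    have hrow := pvRow_mu hab
    simp only [pvClean, pvMu, List.map_cons, List.sum_cons, ne_eq, List.cons.injEq,
      not_and_or] at *
    constructor
    · omega
    · rintro (h | h)
      · have := hrow.2 h; omega
      · have := ih.2 h; omega

theorem pvMu_decreases (g : List (List Char)) (h : pvClean (pvRemoveRoll g) ≠ g) :
    pvMu (pvClean (pvRemoveRoll g)) < pvMu g :=
  (pvMu_clean_le (pvGridRel_removeRoll g)).2 h

-- the while loop of part2
def pvLoop (before state : List (List Char)) (removed : Int) : Int :=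
  if before = state then removed
  else
    let s' := pvRemoveRoll state
    pvLoop state (pvClean s') (removed + pvXcount s')
termination_by (if before = state then 0 else pvMu state + 1)
decreasing_by
  rename_i hne
  rw [if_neg hne]
  by_cases hs : state = pvClean (pvRemoveRoll state)
  · rw [if_pos hs]; omega
  · rw [if_neg hs]
    exact Nat.succ_lt_succ (pvMu_decreases state (fun h => hs h.symm))

def part2 (input_data : String) : Int :=
  pvLoop [] (pvParse input_data) 0

-- ===== PORT B =====

-- {(r, c) for r, line in enumerate(lines) for c, ch in enumerate(line) if ch == "@"}
def pvAliveList (lines : List (List Char)) : List (Int × Int) :=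
  (PySem.List.enumerate lines 0).flatMap (fun rl =>
    ((PySem.List.enumerate rl.2 0).filter (fun cc => cc.2 == '@')).map (fun cc => (rl.1, cc.1)))

-- sum((p[0]+dr, p[1]+dc) in alive for dr, dc in offs)
def pvLiveCnt (alive : List (Int × Int)) (p : Int × Int) : Int :=
  (pvArea.map (fun d => if (p.1 + d.1, p.2 + d.2) ∈ alive then (1 : Int) else 0)).sum

-- {p for p in alive if ... >= 4}
def pvKeep (alive : List (Int × Int)) : List (Int × Int) :=
  alive.filter (fun p => decide (4 ≤ pvLiveCnt alive p))

-- the while True loop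
def pvAltLoop (alive : List (Int × Int)) (total : Int) : Int :=
  let keep := pvKeep alive
  if keep.length = alive.length then total - alive.length
  else pvAltLoop keep total
termination_by alive.length
decreasing_by
  rename_i h
  exact Nat.lt_of_le_of_ne (List.length_filter_le _ _) h

def part2_alt (input_data : String) : Int :=
  pvAltLoop (PySem.Set.ofList (pvAliveList (pvLines input_data)))
    ((PySem.Set.ofList (pvAliveList (pvLines input_data))).length)

-- ===== PRECONDITION & SPEC =====

-- Pre_ restricts to the puzzle's natural domain: after stripping, the lines must form a
-- rectangular grid, and none of them may contain the literal character 'x'.  On ragged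
-- grids A raises IndexError or, when the first row is shortest, returns a value that
-- ignores cells beyond that row's width; a literal 'x' collides with A's internal
-- removal marker and is counted by A as a removed roll.
def Pre_part2 (input_data : String) : Prop :=
  ((pvLines input_data).all
    (fun l => l.length == ((pvLines input_data).headD []).length)) = true ∧
  ((pvLines input_data).all (fun l => l.all (fun ch => !(ch == 'x')))) = true

instance (input_data : String) : Decidable (Pre_part2 input_data) := by
  unfold Pre_part2; infer_instance

def pvWitness_part2 : String := "@@@\n@@@\n@@@"

def Spec_part2 (input_data : String) (out : Int) : Prop := out = part2_alt input_data
instance (input_data : String) (out : Int) : Decidable (Spec_part2 input_data out) := by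
  unfold Spec_part2; infer_instance

-- ===== CLAIM (what is proved, stated in full; the proofs are below) =====
def Claim_equal_part2 : Prop := ∀ (input_data : String), Dom_part2 input_data →
  Pre_part2 input_data → Spec_part2 input_data (part2 input_data)

-- ===== LEMMAS AND PROOFS =====

-- cell (i, j) of a grid, with the blank default
def pvAt (g : List (List Char)) (i j : Nat) : Char := (g.getD i []).getD j ' '

-- the set of live positions of a grid
def pvAtS (g : List (List Char)) : Finset (Int × Int) := (pvAliveList g).toFinset

-- number of live 8-neighbours of p in S
def pvCntS (S : Finset (Int × Int)) (p : Int × Int) : Nat :=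
  pvArea.countP (fun d => decide ((p.1 + d.1, p.2 + d.2) ∈ S))

-- a set in which every member keeps at least 4 live neighbours
def pvGood (S : Finset (Int × Int)) : Prop := ∀ p ∈ S, 4 ≤ pvCntS S p

def pvRect (g : List (List Char)) (w : Nat) : Prop := ∀ row ∈ g, row.length = w

def pvNoX (g : List (List Char)) : Prop := ∀ row ∈ g, ∀ ch ∈ row, ch ≠ 'x'

def pvAts (g : List (List Char)) : Nat := (g.map (fun row => row.count '@')).sum

-- ---- basic cell lemmas ----

theorem pvAt_eq_at {g : List (List Char)} {i j : Nat} {ch : Char} (hch : ch ≠ ' ') :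
    pvAt g i j = ch ↔ ∃ (hi : i < g.length) (hj : j < (g[i]'hi).length), (g[i]'hi)[j]'hj = ch := by
  unfold pvAt
  by_cases hi : i < g.length
  · rw [List.getD_eq_getElem _ _ hi]
    by_cases hj : j < (g[i]'hi).length
    · rw [List.getD_eq_getElem _ _ hj]
      constructor
      · intro h; exact ⟨hi, hj, h⟩
      · rintro ⟨_, _, h⟩; exact h
    · rw [List.getD_eq_default _ _ (Nat.le_of_not_lt hj)]
      constructor
      · intro h; exact absurd h.symm hch
      · rintro ⟨_, hj', _⟩; exact absurd hj' hj
  · rw [List.getD_eq_default _ _ (Nat.le_of_not_lt hi), List.getD_nil]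
    constructor
    · intro h; exact absurd h.symm hch
    · rintro ⟨hi', _, _⟩; exact absurd hi' hi

theorem pvAt_bounds {g : List (List Char)} {i j : Nat} {ch : Char} (hch : ch ≠ ' ')
    (h : pvAt g i j = ch) : i < g.length ∧ j < (g.getD i []).length := by
  rcases (pvAt_eq_at hch).mp h with ⟨hi, hj, _⟩
  exact ⟨hi, by rw [List.getD_eq_getElem _ _ hi]; exact hj⟩

theorem pvMem_aliveList {g : List (List Char)} {p : Int × Int} :
    p ∈ pvAliveList g ↔ 0 ≤ p.1 ∧ 0 ≤ p.2 ∧ pvAt g p.1.toNat p.2.toNat = '@' := by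
  simp only [pvAliveList, List.mem_flatMap, PySem.List.mem_enumerate_iff, List.mem_map,
    List.mem_filter]
  constructor
  · rintro ⟨rl, ⟨k, hk, rfl⟩, cc, ⟨⟨j, hj, rfl⟩, hat⟩, rfl⟩
    simp only [zero_add] at *
    simp only [beq_iff_eq] at hat
    refine ⟨by positivity, by positivity, ?_⟩
    rw [pvAt_eq_at (by decide)]
    refine ⟨by simpa using hk, by simpa using hj, by simpa using hat⟩
  · rintro ⟨h1, h2, hat⟩
    rw [pvAt_eq_at (by decide)] at hat
    obtain ⟨hi, hj, hat⟩ := hat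
    refine ⟨(p.1, g[p.1.toNat]'hi), ⟨p.1.toNat, hi, by simp [h1]⟩,
      (p.2, (g[p.1.toNat]'hi)[p.2.toNat]'hj), ⟨⟨p.2.toNat, hj, by simp [h2]⟩, by simpa using hat⟩,
      by simp⟩

theorem pvNodup_aliveList (g : List (List Char)) : (pvAliveList g).Nodup := by
  unfold pvAliveList
  rw [List.nodup_flatMap]
  constructor
  · intro rl _
    rw [List.Nodup, List.pairwise_map]
    refine ((PySem.List.pairwise_lt_enumerate rl.2 0).filter _).imp ?_
    intro a b hlt
    simp only [ne_eq, Prod.mk.injEq, not_and]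
    intro _ h2
    omega
  · refine (PySem.List.pairwise_lt_enumerate g 0).imp ?_
    intro a b hlt x hxa hxb
    simp only [List.mem_map, List.mem_filter] at hxa hxb
    obtain ⟨c1, _, rfl⟩ := hxa
    obtain ⟨c2, _, heq⟩ := hxb
    rw [Prod.mk.injEq] at heq
    exact absurd heq.1.symm (ne_of_lt hlt)

theorem pvLen_aliveList (g : List (List Char)) : (pvAliveList g).length = pvAts g := by
  unfold pvAliveList pvAts
  rw [List.length_flatMap]
  have hblk : (fun rl : Int × List Char =>
      (((PySem.List.enumerate rl.2 0).filter (fun cc => cc.2 == '@')).map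
        (fun cc => (rl.1, cc.1))).length) =
      (fun rl : Int × List Char => rl.2.count '@') := by
    funext rl
    rw [List.length_map, List.countP_eq_length_filter.symm, List.count]
    have : rl.2.countP (· == '@') =
        ((PySem.List.enumerate rl.2 0).map (·.2)).countP (· == '@') := by
      rw [PySem.List.map_snd_enumerate]
    rw [this, List.countP_map]
    rfl
  calc ((PySem.List.enumerate g 0).map _).sum
      = ((PySem.List.enumerate g 0).map (fun rl => rl.2.count '@')).sum := by rw [hblk]
    _ = (((PySem.List.enumerate g 0).map (·.2)).map (fun row => row.count '@')).sum := by
        rw [List.map_map]; rfl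
    _ = (g.map (fun row => row.count '@')).sum := by rw [PySem.List.map_snd_enumerate]

theorem pvMem_atS {g : List (List Char)} {p : Int × Int} :
    p ∈ pvAtS g ↔ 0 ≤ p.1 ∧ 0 ≤ p.2 ∧ pvAt g p.1.toNat p.2.toNat = '@' := by
  rw [pvAtS, List.mem_toFinset]; exact pvMem_aliveList

theorem pvCard_atS (g : List (List Char)) : (pvAtS g).card = pvAts g := by
  rw [pvAtS, List.toFinset_card_of_nodup (pvNodup_aliveList g), pvLen_aliveList]

theorem pvCntS_mono {S T : Finset (Int × Int)} (h : S ⊆ T) (p : Int × Int) :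
    pvCntS S p ≤ pvCntS T p := by
  unfold pvCntS
  apply List.countP_mono_left
  intro d _ hd
  simp only [decide_eq_true_eq] at *
  exact h hd

-- ---- pointwise consequences of the grid relation ----

theorem pvRowRel_at {r1 r2 : List Char} (h : pvRowRel r1 r2) (j : Nat) :
    r2.getD j ' ' = r1.getD j ' ' ∨ (r1.getD j ' ' = '@' ∧ r2.getD j ' ' = 'x') := by
  induction h generalizing j with
  | nil => left; rfl
  | cons hab _ ih =>
    cases j with
    | zero => simpa using hab
    | succ m => simpa using ih m

theorem pvGridRel_at {g1 g2 : List (List Char)} (h : pvGridRel g1 g2) (i j : Nat) :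
    pvAt g2 i j = pvAt g1 i j ∨ (pvAt g1 i j = '@' ∧ pvAt g2 i j = 'x') := by
  induction h generalizing i with
  | nil => left; rfl
  | cons hab _ ih =>
    cases i with
    | zero => simpa [pvAt] using pvRowRel_at hab j
    | succ m => simpa [pvAt] using ih m

theorem pvAtS_sub_of_rel {g1 g2 : List (List Char)} (h : pvGridRel g1 g2) :
    pvAtS g2 ⊆ pvAtS g1 := by
  intro p hp
  rw [pvMem_atS] at hp ⊢
  refine ⟨hp.1, hp.2.1, ?_⟩
  rcases pvGridRel_at h p.1.toNat p.2.toNat with heq | ⟨ha, _⟩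
  · rw [← heq]; exact hp.2.2
  · exact ha

-- ---- the single scan step ----

theorem pvStep_cases (h w : Int) (g : List (List Char)) (r c : Int)
    (hr : 0 ≤ r) (hc : 0 ≤ c) :
    pvStep h w g r c = g ∨
      (pvAt g r.toNat c.toNat = '@' ∧ pvCnt g h w r c < 4 ∧ pvStep h w g r c = pvSetX g r c) := by
  unfold pvStep
  have hgget : pvGget g r c = pvAt g r.toNat c.toNat := by
    unfold pvGget pvAt
    rw [PySem.List.pyGetD_of_nonneg _ _ hr, PySem.List.pyGetD_of_nonneg _ _ hc]
  split_ifs with h1 h2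
  · right; exact ⟨by rw [← hgget]; exact h1, h2, rfl⟩
  · left; rfl
  · left; rfl

theorem pvGetD_set_ne {α : Type} (l : List α) (n j : Nat) (a d : α) (h : n ≠ j) :
    (l.set n a).getD j d = l.getD j d := by
  simp [List.getD_eq_getElem?_getD, h]

theorem pvGetD_set_self {α : Type} (l : List α) (n : Nat) (a d : α) (h : n < l.length) :
    (l.set n a).getD n d = a := by
  simp [List.getD_eq_getElem?_getD, h]

theorem pvAt_setX {g : List (List Char)} {r c : Int} (hr : 0 ≤ r) (_hc : 0 ≤ c)
    (h : pvAt g r.toNat c.toNat = '@') (i j : Nat) :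
    pvAt (pvSetX g r c) i j = if i = r.toNat ∧ j = c.toNat then 'x' else pvAt g i j := by
  obtain ⟨hrn, hcn⟩ := pvAt_bounds (by decide) h
  unfold pvAt pvSetX
  rw [PySem.List.pyGetD_of_nonneg _ _ hr]
  by_cases hi : i = r.toNat
  · subst hi
    rw [pvGetD_set_self _ _ _ _ hrn]
    by_cases hj : j = c.toNat
    · subst hj
      rw [pvGetD_set_self _ _ _ _ hcn, if_pos ⟨rfl, rfl⟩]
    · rw [pvGetD_set_ne _ _ _ _ _ (fun hh => hj hh.symm), if_neg (fun hh => hj hh.2)]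
  · rw [pvGetD_set_ne _ _ _ _ _ (fun hh => hi hh.symm), if_neg (fun hh => hi hh.1)]

theorem pvSetX_length {g : List (List Char)} (r c : Int) : (pvSetX g r c).length = g.length := by
  simp [pvSetX]

theorem pvSetX_rect {g : List (List Char)} {w : Nat} (hrect : pvRect g w) {r : Int} (c : Int)
    (hr : 0 ≤ r) : pvRect (pvSetX g r c) w := by
  intro row hrow
  unfold pvSetX at hrow
  rw [PySem.List.pyGetD_of_nonneg _ _ hr] at hrow
  by_cases hrn : r.toNat < g.length
  · rcases List.mem_or_eq_of_mem_set hrow with hmem | rfl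
    · exact hrect row hmem
    · rw [List.length_set, List.getD_eq_getElem _ _ hrn]
      exact hrect _ (List.getElem_mem hrn)
  · rw [List.set_eq_of_length_le (Nat.le_of_not_lt hrn)] at hrow
    exact hrect row hrow

theorem pvAtS_setX {g : List (List Char)} {r c : Int} (hr : 0 ≤ r) (hc : 0 ≤ c)
    (h : pvAt g r.toNat c.toNat = '@') :
    pvAtS (pvSetX g r c) = pvAtS g \ {(r, c)} := by
  ext p
  rw [pvMem_atS, Finset.mem_sdiff, pvMem_atS, Finset.mem_singleton,
    pvAt_setX hr hc h p.1.toNat p.2.toNat]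
  by_cases hpq : p.1.toNat = r.toNat ∧ p.2.toNat = c.toNat
  · rw [if_pos hpq]
    constructor
    · rintro ⟨_, _, hx⟩; exact absurd hx (by decide)
    · rintro ⟨⟨h1, h2, _⟩, hne⟩
      exact absurd (Prod.ext_iff.mpr ⟨by omega, by omega⟩) hne
  · rw [if_neg hpq]
    constructor
    · rintro ⟨h1, h2, hat⟩
      refine ⟨⟨h1, h2, hat⟩, fun hpe => hpq ?_⟩
      rw [hpe]
      exact ⟨rfl, rfl⟩
    · rintro ⟨⟨h1, h2, hat⟩, _⟩
      exact ⟨h1, h2, hat⟩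

-- ---- the neighbour-count bridge ----

theorem pvCnt_eq {g : List (List Char)} {w : Nat} (hrect : pvRect g w) (r c : Int) :
    pvCnt g (g.length : Int) (w : Int) r c = (pvCntS (pvAtS g) (r, c) : Int) := by
  unfold pvCnt
  rw [PySem.List.foldl_congr_mem pvArea _
    (fun acc d => if decide ((r + d.1, c + d.2) ∈ pvAtS g) = true then acc + 1 else acc) 0 ?_,
    PySem.List.foldl_count_if]
  · simp [pvCntS]
  · intro acc d _
    by_cases hmem : (r + d.1, c + d.2) ∈ pvAtS g
    · rcases pvMem_atS.mp hmem with ⟨h1, h2, hat⟩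
      obtain ⟨hb1, hb2⟩ := pvAt_bounds (by decide) hat
      have hw : (g.getD (r + d.1).toNat []).length = w := by
        rw [List.getD_eq_getElem _ _ hb1]
        exact hrect _ (List.getElem_mem hb1)
      have hQ : pvGget g (r + d.1) (c + d.2) = '@' := by
        unfold pvGget
        rw [PySem.List.pyGetD_of_nonneg _ _ h1, PySem.List.pyGetD_of_nonneg _ _ h2]
        exact hat
      have hP : 0 ≤ r + d.1 ∧ r + d.1 < (g.length : Int) ∧ 0 ≤ c + d.2 ∧ c + d.2 < (w : Int) := by
        rw [hw] at hb2
        omega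
      simp [hP, hQ, hmem]
    · have hdec : decide ((r + d.1, c + d.2) ∈ pvAtS g) = false := by simpa using hmem
      simp only [hdec, Bool.false_eq_true, if_false]
      split_ifs with hP hQ
      · exfalso
        apply hmem
        apply pvMem_atS.mpr
        refine ⟨hP.1, hP.2.2.1, ?_⟩
        unfold pvGget at hQ
        rw [PySem.List.pyGetD_of_nonneg _ _ hP.1, PySem.List.pyGetD_of_nonneg _ _ hP.2.2.1] at hQ
        exact hQ
      · rfl
      · rfl

-- ---- one full scan (remove_roll) ----

theorem pvPass (w : Nat) (G : Finset (Int × Int)) (hG : pvGood G) (ps : List (Int × Int)) :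
    ∀ g : List (List Char), pvRect g w → (∀ p ∈ ps, 0 ≤ p.1 ∧ 0 ≤ p.2) → G ⊆ pvAtS g →
    (ps.foldl (fun g2 p => pvStep (g.length : Int) (w : Int) g2 p.1 p.2) g).length = g.length ∧
    pvRect (ps.foldl (fun g2 p => pvStep (g.length : Int) (w : Int) g2 p.1 p.2) g) w ∧
    G ⊆ pvAtS (ps.foldl (fun g2 p => pvStep (g.length : Int) (w : Int) g2 p.1 p.2) g) := by
  induction ps with
  | nil => intro g hrect _ hsub; exact ⟨rfl, hrect, hsub⟩
  | cons q t ih =>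
    intro g hrect hpos hsub
    obtain ⟨hq1, hq2⟩ := hpos q (by simp)
    simp only [List.foldl_cons]
    rcases pvStep_cases (g.length : Int) (w : Int) g q.1 q.2 hq1 hq2 with hid | ⟨hat, hcnt, hfire⟩
    · rw [hid]
      exact ih g hrect (fun p hp => hpos p (by simp [hp])) hsub
    · rw [hfire]
      have hlen : (pvSetX g q.1 q.2).length = g.length := pvSetX_length _ _
      have hrect' : pvRect (pvSetX g q.1 q.2) w := pvSetX_rect hrect _ hq1
      have hsub' : G ⊆ pvAtS (pvSetX g q.1 q.2) := by
        rw [pvAtS_setX hq1 hq2 hat]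
        intro x hx
        rw [Finset.mem_sdiff, Finset.mem_singleton]
        refine ⟨hsub hx, ?_⟩
        rintro rfl
        have h4 : 4 ≤ pvCntS G (q.1, q.2) := hG _ hx
        have hle : pvCntS G (q.1, q.2) ≤ pvCntS (pvAtS g) (q.1, q.2) := pvCntS_mono hsub _
        rw [pvCnt_eq hrect q.1 q.2] at hcnt
        omega
      have hres := ih (pvSetX g q.1 q.2) hrect' (fun p hp => hpos p (by simp [hp])) hsub'
      rw [hlen] at hres
      exact hres

theorem pvNofire (w : Nat) (ps : List (Int × Int)) :
    ∀ g : List (List Char), pvRect g w → (∀ p ∈ ps, 0 ≤ p.1 ∧ 0 ≤ p.2) →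
    ps.foldl (fun g2 p => pvStep (g.length : Int) (w : Int) g2 p.1 p.2) g = g →
    ∀ p ∈ ps, pvAt g p.1.toNat p.2.toNat = '@' → 4 ≤ pvCntS (pvAtS g) p := by
  induction ps with
  | nil => intro g _ _ _ p hp; simp at hp
  | cons q t ih =>
    intro g hrect hpos hfold p hp hatp
    obtain ⟨hq1, hq2⟩ := hpos q (by simp)
    rw [List.foldl_cons] at hfold
    -- the step at q cannot have fired: an 'x' written at q would persist to the end of the
    -- scan, contradicting that the final grid is g itself
    have hstep : pvStep (g.length : Int) (w : Int) g q.1 q.2 = g := by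
      rcases pvStep_cases (g.length : Int) (w : Int) g q.1 q.2 hq1 hq2 with hid | ⟨hat, _, hfire⟩
      · exact hid
      · exfalso
        rw [hfire] at hfold
        have hrel : pvGridRel (pvSetX g q.1 q.2)
            (t.foldl (fun g2 p => pvStep (g.length : Int) (w : Int) g2 p.1 p.2)
              (pvSetX g q.1 q.2)) :=
          pvGridRel_fold _ _ t _ (fun p hp => ⟨(hpos p (by simp [hp])).1, (hpos p (by simp [hp])).2⟩)
        have hx : pvAt (pvSetX g q.1 q.2) q.1.toNat q.2.toNat = 'x' := by
          rw [pvAt_setX hq1 hq2 hat, if_pos ⟨rfl, rfl⟩]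
        rcases pvGridRel_at hrel q.1.toNat q.2.toNat with heq | ⟨ha, _⟩
        · rw [hfold, hx] at heq
          exact absurd (heq.symm.trans hat) (by decide)
        · rw [hx] at ha
          exact absurd ha (by decide)
    rw [hstep] at hfold
    rcases List.mem_cons.mp hp with rfl | hpt
    · -- the non-fired condition at p itself
      unfold pvStep at hstep
      have hgget : pvGget g p.1 p.2 = '@' := by
        unfold pvGget
        rw [PySem.List.pyGetD_of_nonneg _ _ hq1, PySem.List.pyGetD_of_nonneg _ _ hq2]
        exact hatp
      rw [if_pos hgget] at hstep
      by_cases hlt : pvCnt g (g.length : Int) (w : Int) p.1 p.2 < 4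
      · exfalso
        rw [if_pos hlt] at hstep
        have hx : pvAt (pvSetX g p.1 p.2) p.1.toNat p.2.toNat = 'x' := by
          rw [pvAt_setX hq1 hq2 hatp, if_pos ⟨rfl, rfl⟩]
        rw [hstep] at hx
        exact absurd (hx.symm.trans hatp) (by decide)
      · rw [pvCnt_eq hrect p.1 p.2] at hlt
        have hpp : pvCntS (pvAtS g) (p.1, p.2) = pvCntS (pvAtS g) p := rfl
        omega
    · exact ih g hrect (fun x hx => hpos x (by simp [hx])) hfold p hpt hatp

theorem pvRow_clean_eq {r s : List Char} (hrel : pvRowRel r s) (hnox : ∀ ch ∈ r, ch ≠ 'x')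
    (h : s.map (fun ch => if ch = 'x' then '.' else ch) = r) : s = r := by
  induction hrel with
  | nil => rfl
  | @cons a b l1 l2 hab _ ih =>
    simp only [List.map_cons, List.cons.injEq] at h
    obtain ⟨hhd, htl⟩ := h
    have hb : b = a := by
      rcases hab with hba | ⟨ha, hb⟩
      · exact hba
      · subst ha; subst hb; simp at hhd
    rw [hb, ih (fun ch hch => hnox ch (by simp [hch])) htl]

theorem pvFold_eq_of_clean_eq {g f : List (List Char)} (hrel : pvGridRel g f)
    (hnox : pvNoX g) (h : pvClean f = g) : f = g := by
  induction hrel with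
  | nil => rfl
  | @cons a b l1 l2 hab _ ih =>
    simp only [pvClean, List.map_cons, List.cons.injEq] at h
    obtain ⟨hhd, htl⟩ := h
    rw [pvRow_clean_eq hab (fun ch hch => hnox a (by simp) ch hch) hhd,
      ih (fun row hrow ch hch => hnox row (by simp [hrow]) ch hch) htl]

-- ---- clean ----

theorem pvGetD_map {α β : Type} (l : List α) (f : α → β) (n : Nat) (d : α) :
    (l.map f).getD n (f d) = f (l.getD n d) := by
  cases h : l[n]? <;>
    simp [List.getD_eq_getElem?_getD, List.getElem?_map, h]

theorem pvAt_clean (g : List (List Char)) (i j : Nat) :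
    pvAt (pvClean g) i j = if pvAt g i j = 'x' then '.' else pvAt g i j := by
  unfold pvAt pvClean
  have h1 : ((g.map (fun row => row.map (fun ch => if ch = 'x' then '.' else ch))).getD i
      ([].map (fun ch => if ch = 'x' then '.' else ch))) =
      (g.getD i []).map (fun ch => if ch = 'x' then '.' else ch) :=
    pvGetD_map g _ i []
  simp only [List.map_nil] at h1
  rw [h1]
  have h2 := pvGetD_map (g.getD i []) (fun ch => if ch = 'x' then '.' else ch) j ' '
  simp only [if_neg (by decide : ¬ (' ' = 'x'))] at h2
  exact h2

theorem pvAtS_clean (g : List (List Char)) : pvAtS (pvClean g) = pvAtS g := by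
  ext p
  rw [pvMem_atS, pvMem_atS, pvAt_clean]
  by_cases hx : pvAt g p.1.toNat p.2.toNat = 'x'
  · rw [if_pos hx, hx]
    constructor
    · rintro ⟨_, _, h⟩; exact absurd h (by decide)
    · rintro ⟨_, _, h⟩; exact absurd h (by decide)
  · rw [if_neg hx]

theorem pvClean_rect {g : List (List Char)} {w : Nat} (hrect : pvRect g w) :
    pvRect (pvClean g) w := by
  intro row hrow
  rcases List.mem_map.mp hrow with ⟨r0, hr0, rfl⟩
  rw [List.length_map]
  exact hrect r0 hr0

theorem pvClean_noX (g : List (List Char)) : pvNoX (pvClean g) := by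
  intro row hrow ch hch
  rcases List.mem_map.mp hrow with ⟨r0, _, rfl⟩
  rcases List.mem_map.mp hch with ⟨c0, _, rfl⟩
  by_cases hc : c0 = 'x' <;> simp [hc]

theorem pvAts_clean (g : List (List Char)) : pvAts (pvClean g) = pvAts g := by
  unfold pvAts pvClean
  rw [List.map_map]
  congr 1
  apply List.map_congr_left
  intro row _
  simp only [Function.comp_apply, List.count, List.countP_map]
  apply List.countP_congr
  intro ch _
  by_cases hc : ch = 'x' <;> simp [hc]

-- ---- removal accounting ----

theorem pvRow_count_split {r s : List Char} (hrel : pvRowRel r s) (hnox : ∀ ch ∈ r, ch ≠ 'x') :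
    r.count '@' = s.count '@' + s.count 'x' := by
  induction hrel with
  | nil => rfl
  | @cons a b l1 l2 hab _ ih =>
    have htl := ih (fun ch hch => hnox ch (by simp [hch]))
    have hax : a ≠ 'x' := hnox a (by simp)
    rcases hab with hba | ⟨ha, hb⟩
    · by_cases hq : a = '@'
      · simp only [List.count_cons, beq_iff_eq, hba, hq,
          if_neg (by decide : ¬('@' : Char) = 'x')]
        omega
      · simp only [List.count_cons, beq_iff_eq, hba, if_neg hq, if_neg hax]
        omega
    · simp only [List.count_cons, beq_iff_eq, ha, hb,
        if_neg (by decide : ¬('x' : Char) = '@')]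
      omega

theorem pvCount_split {g s : List (List Char)} (hrel : pvGridRel g s) (hnox : pvNoX g) :
    pvAts g = pvAts s + (s.map (fun row => row.count 'x')).sum := by
  induction hrel with
  | nil => rfl
  | @cons a b l1 l2 hab _ ih =>
    have := pvRow_count_split hab (fun ch hch => hnox a (by simp) ch hch)
    have htl := ih (fun row hrow ch hch => hnox row (by simp [hrow]) ch hch)
    simp only [pvAts, List.map_cons, List.sum_cons] at *
    omega

theorem pvXcount_cast (s : List (List Char)) :
    pvXcount s = (((s.map (fun row => row.count 'x')).sum : Nat) : Int) := by
  unfold pvXcount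
  rw [Nat.cast_list_sum, List.map_map]
  rfl

-- ---- the A loop ----

theorem pvLoop_val (w : Nat) (before g : List (List Char)) (removed : Int) :
    pvRect g w → pvNoX g → (before = g → pvGood (pvAtS g)) →
    ∃ F : Finset (Int × Int), pvGood F ∧ F ⊆ pvAtS g ∧
      (∀ G : Finset (Int × Int), pvGood G → G ⊆ pvAtS g → G ⊆ F) ∧
      pvLoop before g removed = removed + (pvAts g : Int) - F.card := by
  induction before, g, removed using pvLoop.induct with
  | case1 g removed =>
    intro _ _ hstart
    refine ⟨pvAtS g, hstart rfl, Finset.Subset.refl _, fun G _ hsub => hsub, ?_⟩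
    rw [pvLoop, if_pos rfl, pvCard_atS]
    ring
  | case2 before g removed hne s'have ih =>
    intro hrect hnox hstart
    by_cases hgnil : g = []
    · subst hgnil
      refine ⟨∅, fun p hp => absurd hp (Finset.notMem_empty p), Finset.empty_subset _,
        fun G hGg hGsub => ?_, ?_⟩
      · intro x hx
        exact absurd (hGsub hx) (by simp [pvAtS, pvAliveList, PySem.List.enumerate])
      · rw [pvLoop, if_neg hne]
        show pvLoop [] (pvClean (pvRemoveRoll [])) (removed + pvXcount (pvRemoveRoll [])) = _
        have hrr : pvRemoveRoll [] = ([] : List (List Char)) := rfl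
        rw [hrr]
        have hcl : pvClean [] = ([] : List (List Char)) := rfl
        rw [hcl, pvLoop, if_pos rfl]
        simp [pvXcount, pvAts]
    · -- the width of the grid is w
      have hw0 : (PySem.List.pyGetD g 0 []).length = w := by
        rw [PySem.List.pyGetD_zero]
        obtain ⟨hd, tl, rfl⟩ := List.exists_cons_of_ne_nil hgnil
        exact hrect hd (by simp)
      have hpos : ∀ p ∈ pvPs (g.length : Int) (w : Int), 0 ≤ p.1 ∧ 0 ≤ p.2 := by
        intro p hp
        rcases pvMem_pvPs.mp hp with ⟨h1, _, h3, _⟩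
        exact ⟨h1, h3⟩
      have hrr : pvRemoveRoll g = (pvPs (g.length : Int) (w : Int)).foldl
          (fun g2 p => pvStep (g.length : Int) (w : Int) g2 p.1 p.2) g := by
        rw [pvRemoveRoll_eq, hw0]
      -- shape facts for the scanned grid
      obtain ⟨hlen', hrect', _⟩ :=
        pvPass w ∅ (fun p hp => absurd hp (Finset.notMem_empty p)) _ g hrect hpos
          (Finset.empty_subset _)
      rw [← hrr] at hlen' hrect'
      have hrel : pvGridRel g (pvRemoveRoll g) := pvGridRel_removeRoll g
      have hsubS : pvAtS (pvRemoveRoll g) ⊆ pvAtS g := pvAtS_sub_of_rel hrel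
      -- invariant hypotheses for the recursive call
      have hrectC : pvRect (pvClean (pvRemoveRoll g)) w := pvClean_rect hrect'
      have hnoxC : pvNoX (pvClean (pvRemoveRoll g)) := pvClean_noX _
      have hstartC : g = pvClean (pvRemoveRoll g) → pvGood (pvAtS (pvClean (pvRemoveRoll g))) := by
        intro heq
        have hfg : pvRemoveRoll g = g := pvFold_eq_of_clean_eq hrel hnox heq.symm
        have hgood : pvGood (pvAtS g) := by
          intro p hp
          rcases pvMem_atS.mp hp with ⟨h1, h2, hat⟩
          obtain ⟨hb1, hb2⟩ := pvAt_bounds (by decide) hat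
          have hwp : (g.getD p.1.toNat []).length = w := by
            rw [List.getD_eq_getElem _ _ hb1]
            exact hrect _ (List.getElem_mem hb1)
          refine pvNofire w _ g hrect hpos ?_ p ?_ hat
          · rw [← hrr]; exact hfg
          · rw [pvMem_pvPs]
            rw [hwp] at hb2
            refine ⟨h1, by omega, h2, by omega⟩
        rw [pvAtS_clean, hfg]
        exact hgood
      obtain ⟨F, hFg, hFsub, hFmax, hval⟩ := ih hrectC hnoxC hstartC
      have hsv : s'have = pvRemoveRoll g := rfl
      rw [hsv] at hFsub hFmax hval
      refine ⟨F, hFg, ?_, ?_, ?_⟩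
      · rw [pvAtS_clean] at hFsub
        exact hFsub.trans hsubS
      · intro G hGg hGsub
        obtain ⟨_, _, hGkeep⟩ := pvPass w G hGg _ g hrect hpos hGsub
        rw [← hrr] at hGkeep
        apply hFmax G hGg
        rw [pvAtS_clean]
        exact hGkeep
      · rw [pvLoop, if_neg hne]
        show pvLoop g (pvClean (pvRemoveRoll g)) (removed + pvXcount (pvRemoveRoll g)) = _
        rw [hval, pvXcount_cast]
        have h1 : pvAts (pvClean (pvRemoveRoll g)) = pvAts (pvRemoveRoll g) := pvAts_clean _
        have h2 : pvAts g = pvAts (pvRemoveRoll g) +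
            ((pvRemoveRoll g).map (fun row => row.count 'x')).sum := pvCount_split hrel hnox
        omega

-- ---- the B loop ----

theorem pvLiveCnt_eq (alive : List (Int × Int)) (p : Int × Int) :
    pvLiveCnt alive p = (pvCntS alive.toFinset p : Int) := by
  unfold pvLiveCnt
  have hfun : (fun d : Int × Int => if (p.1 + d.1, p.2 + d.2) ∈ alive then (1 : Int) else 0) =
      (fun d : Int × Int =>
        if decide ((p.1 + d.1, p.2 + d.2) ∈ alive.toFinset) = true then (1 : Int) else 0) := by
    funext d
    by_cases hmem : (p.1 + d.1, p.2 + d.2) ∈ alive <;>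
      simp [hmem, List.mem_toFinset]
  rw [hfun, PySem.List.sum_map_ite_one_zero]
  rfl

theorem pvAltLoop_val (alive : List (Int × Int)) (total : Int) :
    alive.Nodup →
    ∃ F : Finset (Int × Int), pvGood F ∧ F ⊆ alive.toFinset ∧
      (∀ G : Finset (Int × Int), pvGood G → G ⊆ alive.toFinset → G ⊆ F) ∧
      pvAltLoop alive total = total - F.card := by
  induction alive using pvAltLoop.induct with
  | case1 alive keephave hlen =>
    intro hnd
    have hall : ∀ p ∈ alive, decide (4 ≤ pvLiveCnt alive p) = true :=
      List.length_filter_eq_length_iff.mp hlen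
    refine ⟨alive.toFinset, ?_, Finset.Subset.refl _, fun G _ hsub => hsub, ?_⟩
    · intro p hp
      have := hall p (List.mem_toFinset.mp hp)
      rw [decide_eq_true_eq, pvLiveCnt_eq] at this
      exact_mod_cast this
    · rw [pvAltLoop, if_pos hlen, List.toFinset_card_of_nodup hnd]
  | case2 alive keephave hlen ih =>
    intro hnd
    have hkv : keephave = pvKeep alive := rfl
    obtain ⟨F, hFg, hFsub, hFmax, hval⟩ := ih (hnd.filter _)
    rw [hkv] at hFsub hFmax hval
    refine ⟨F, hFg, ?_, ?_, ?_⟩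
    · refine hFsub.trans ?_
      intro x hx
      rw [List.mem_toFinset] at hx ⊢
      exact List.mem_of_mem_filter hx
    · intro G hGg hGsub
      apply hFmax G hGg
      intro x hx
      rw [List.mem_toFinset]
      unfold pvKeep
      rw [List.mem_filter]
      have hxa : x ∈ alive := List.mem_toFinset.mp (hGsub hx)
      refine ⟨hxa, ?_⟩
      rw [decide_eq_true_eq, pvLiveCnt_eq]
      have h4 : 4 ≤ pvCntS G x := hGg x hx
      have hle : pvCntS G x ≤ pvCntS alive.toFinset x := pvCntS_mono (fun y hy => hGsub hy) x
      omega
    · rw [pvAltLoop, if_neg hlen, hval]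

-- ===== VERDICT (by name: the statement is the Claim_ definition above) =====
theorem part2_spec : Claim_equal_part2 := by
  intro input _ hpre
  unfold Spec_part2 part2 part2_alt
  obtain ⟨hrect0, hchars⟩ := hpre
  rw [List.all_eq_true] at hrect0 hchars
  set lines := pvLines input with hl
  have hrect : pvRect lines ((lines.headD []).length) := by
    intro row hrow
    have := hrect0 row hrow
    rwa [beq_iff_eq] at this
  have hnox : pvNoX lines := by
    intro row hrow ch hch
    have := hchars row hrow
    rw [List.all_eq_true] at this
    have hc := this ch hch
    simpa using hc
  have hstart : ([] : List (List Char)) = lines → pvGood (pvAtS lines) := by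
    intro h
    rw [← h]
    intro p hp
    simp [pvAtS, pvAliveList] at hp
  obtain ⟨FA, hFAg, hFAsub, hFAmax, hA⟩ := pvLoop_val _ [] lines 0 hrect hnox hstart
  have hnd : (pvAliveList lines).Nodup := pvNodup_aliveList lines
  show pvLoop [] lines 0 = pvAltLoop (PySem.Set.ofList (pvAliveList lines))
    ((PySem.Set.ofList (pvAliveList lines)).length : Int)
  rw [PySem.Set.ofList_eq_self_of_nodup _ hnd]
  obtain ⟨FB, hFBg, hFBsub, hFBmax, hB⟩ := pvAltLoop_val (pvAliveList lines) _ hnd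
  have hts : (pvAliveList lines).toFinset = pvAtS lines := rfl
  rw [hts] at hFBsub hFBmax
  have hFAB : FA = FB := Finset.Subset.antisymm (hFBmax FA hFAg hFAsub) (hFAmax FB hFBg hFBsub)
  show pvLoop [] lines 0 = pvAltLoop (pvAliveList lines) ((pvAliveList lines).length : Int)
  rw [hA, hB, hFAB, pvLen_aliveList]
  ring
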